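-- pv_equiv track=rewrite | github.com/4To4ka/vlm-visual-quality-assessment | QualityBackbones/src/quality_backbones/maniqa_training.py | _sanitize_heads
-- ===== SOURCE A (Python) =====
-- def _sanitize_heads(num_heads: list[int], channels: int) -> list[int]:
--     out: list[int] = []
--     for requested in num_heads:
--         head = max(1, int(requested))
--         head = min(head, channels)
--         while head > 1 and channels % head != 0:
--             head -= 1
--         out.append(max(1, head))
--     return out
-- ===== SOURCE B (Python) =====
-- def _sanitize_heads(num_heads, channels):
--     lo = []
--     hi = []
--     i = 1
--     while i * i <= channels:
--         if channels % i == 0: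
--             lo.append(i)
--             if i * i != channels:
--                 hi.append(channels // i)
--         i += 1
--     desc = hi + lo[::-1]
--     cache = {}
--     out = []
--     for requested in num_heads:
--         cap = min(max(1, int(requested)), channels)
--         head = cache.get(cap)
--         if head is None:
--             head = 1
--             for d in desc:
--                 if d <= cap:
--                     head = d
--                     break
--             cache[cap] = head
--         out.append(head)
--     return out
-- ===== Notes on version B (the rewrite author's own statement) =====
-- stated objective: faster
-- what changed: Instead of decrementing each requested head until it divides channels (O(channels) work per element), B enumerates all divisors of channels once up to sqrt(channels), answers each request by scanning the descending divisor list for the first divisor not exceeding the clamped request, and memoizes answers per clamped request in a dict.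
import Mathlib
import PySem

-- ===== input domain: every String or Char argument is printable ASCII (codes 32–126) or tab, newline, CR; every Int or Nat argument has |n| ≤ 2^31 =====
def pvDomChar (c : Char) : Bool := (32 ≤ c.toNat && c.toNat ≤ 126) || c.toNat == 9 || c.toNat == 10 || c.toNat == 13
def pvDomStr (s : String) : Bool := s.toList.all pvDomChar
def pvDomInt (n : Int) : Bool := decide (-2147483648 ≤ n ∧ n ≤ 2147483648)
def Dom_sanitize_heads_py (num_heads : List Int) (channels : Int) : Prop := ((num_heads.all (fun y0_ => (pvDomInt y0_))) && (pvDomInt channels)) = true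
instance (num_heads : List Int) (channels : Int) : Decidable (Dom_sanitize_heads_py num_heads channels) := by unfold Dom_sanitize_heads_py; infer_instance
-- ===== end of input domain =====

-- B enumerates the divisors of channels once (up to sqrt) instead of decrementing
-- each requested head until it divides channels; return values are identical.

-- ===== PORT A =====
-- the 'while head > 1 and channels % head != 0: head -= 1' loop
def pvALoop (channels head : Int) : Int :=
  if h : 1 < head ∧ PySem.Int.mod channels head ≠ 0 then pvALoop channels (head - 1)
  else head
termination_by head.toNat
decreasing_by omega

def sanitize_heads_py (num_heads : List Int) (channels : Int) : List Int :=
  num_heads.foldl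
    (fun out requested =>
      out ++ [max 1 (pvALoop channels (min (max 1 requested) channels))]) []

-- ===== PORT B =====
-- the 'while i * i <= channels' divisor-collecting loop of Source B (state: i, lo, hi)
def pvBuildDivs (c i : Int) (lo hi : List Int) : List Int × List Int :=
  if h : i * i ≤ c then
    if PySem.Int.mod c i = 0 then
      pvBuildDivs c (i + 1) (lo ++ [i])
        (if i * i ≠ c then hi ++ [PySem.Int.floordiv c i] else hi)
    else pvBuildDivs c (i + 1) lo hi
  else (lo, hi)
termination_by (c + 1 - i).toNat
decreasing_by
  all_goals
    have h1 : i ≤ i * i := by nlinarith [mul_self_nonneg (i - 1), mul_self_nonneg i]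
    omega

-- the 'for d in desc: if d <= cap: head = d; break' loop (head initialised to 1)
def pvBScan (desc : List Int) (cap : Int) : Int :=
  match desc with
  | [] => 1
  | d :: rest => if d ≤ cap then d else pvBScan rest cap

def sanitize_heads_py_alt (num_heads : List Int) (channels : Int) : List Int :=
  let p := pvBuildDivs channels 1 [] []
  let desc := p.2 ++ p.1.reverse
  (num_heads.foldl
    (fun (st : PySem.Dict Int Int × List Int) requested =>
      let cap := min (max 1 requested) channels
      match st.1.get? cap with
      | some head => (st.1, st.2 ++ [head])
      | none => (st.1.insert cap (pvBScan desc cap), st.2 ++ [pvBScan desc cap]))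
    (PySem.Dict.empty, [])).2

-- ===== PRECONDITION & SPEC =====
def Spec_sanitize_heads_py (num_heads : List Int) (channels : Int) (out : List Int) : Prop := out = sanitize_heads_py_alt num_heads channels
instance (num_heads : List Int) (channels : Int) (out : List Int) : Decidable (Spec_sanitize_heads_py num_heads channels out) := by unfold Spec_sanitize_heads_py; infer_instance

-- ===== CLAIM (what is proved, stated in full; the proofs are below) =====
def Claim_equal_sanitize_heads_py : Prop := ∀ (num_heads : List Int) (channels : Int), Dom_sanitize_heads_py num_heads channels → Spec_sanitize_heads_py num_heads channels (sanitize_heads_py num_heads channels)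

-- ===== LEMMAS AND PROOFS =====

-- ghost (non-accumulating) versions of the divisor-collecting loop
def smallsFrom (c i : Int) : List Int :=
  if h : i * i ≤ c then
    if PySem.Int.mod c i = 0 then i :: smallsFrom c (i + 1) else smallsFrom c (i + 1)
  else []
termination_by (c + 1 - i).toNat
decreasing_by
  all_goals
    have h1 : i ≤ i * i := by nlinarith [mul_self_nonneg (i - 1), mul_self_nonneg i]
    omega

def bigsFrom (c i : Int) : List Int :=
  if h : i * i ≤ c then
    if PySem.Int.mod c i = 0 then
      (if i * i ≠ c then [PySem.Int.floordiv c i] else []) ++ bigsFrom c (i + 1)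
    else bigsFrom c (i + 1)
  else []
termination_by (c + 1 - i).toNat
decreasing_by
  all_goals
    have h1 : i ≤ i * i := by nlinarith [mul_self_nonneg (i - 1), mul_self_nonneg i]
    omega

theorem pvBuildDivs_eq (c i : Int) (lo hi : List Int) :
    pvBuildDivs c i lo hi = (lo ++ smallsFrom c i, hi ++ bigsFrom c i) := by
  fun_induction pvBuildDivs c i lo hi with
  | case1 i lo hi h hm ih =>
      conv_rhs => rw [smallsFrom, bigsFrom]
      simp only [dif_pos h, if_pos hm, dite_eq_ite] at *
      rw [ih]
      split <;> simp
  | case2 i lo hi h hm ih =>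
      conv_rhs => rw [smallsFrom, bigsFrom]
      simp only [dif_pos h, if_neg hm] at *
      rw [ih]
  | case3 i lo hi h =>
      conv_rhs => rw [smallsFrom, bigsFrom]
      simp [h]

theorem mem_smallsFrom (c i x : Int) :
    1 ≤ i → (x ∈ smallsFrom c i ↔ i ≤ x ∧ x * x ≤ c ∧ x ∣ c) := by
  fun_induction smallsFrom c i with
  | case1 i h hm ih =>
      intro hi1
      have hdvd : i ∣ c := (PySem.Int.mod_eq_zero_iff_dvd c i).mp hm
      rw [List.mem_cons, ih (by omega)]
      constructor
      · rintro (rfl | ⟨h1, h2, h3⟩)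
        · exact ⟨le_refl _, h, hdvd⟩
        · exact ⟨by omega, h2, h3⟩
      · rintro ⟨h1, h2, h3⟩
        rcases eq_or_lt_of_le h1 with heq | hlt
        · exact Or.inl heq.symm
        · exact Or.inr ⟨by omega, h2, h3⟩
  | case2 i h hm ih =>
      intro hi1
      rw [ih (by omega)]
      constructor
      · rintro ⟨h1, h2, h3⟩; exact ⟨by omega, h2, h3⟩
      · rintro ⟨h1, h2, h3⟩
        refine ⟨?_, h2, h3⟩
        rcases eq_or_lt_of_le h1 with heq | hlt
        · exact absurd ((PySem.Int.mod_eq_zero_iff_dvd c i).mpr (heq ▸ h3)) hm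
        · omega
  | case3 i h =>
      intro hi1
      simp only [List.not_mem_nil, false_iff]
      rintro ⟨h1, h2, h3⟩
      have : i * i ≤ x * x := by nlinarith
      omega

theorem smallsFrom_pairwise (c i : Int) :
    1 ≤ i → (smallsFrom c i).Pairwise (· < ·) := by
  fun_induction smallsFrom c i with
  | case1 i h hm ih =>
      intro hi1
      refine List.Pairwise.cons ?_ (ih (by omega))
      intro x hx
      have := ((mem_smallsFrom c (i + 1) x) (by omega)).mp hx
      omega
  | case2 i h hm ih => intro hi1; exact ih (by omega)
  | case3 i h => intro _; exact List.Pairwise.nil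

theorem bigsFrom_eq (c i : Int) :
    bigsFrom c i = ((smallsFrom c i).filter (fun j => j * j ≠ c)).map
      (fun j => PySem.Int.floordiv c j) := by
  fun_induction bigsFrom c i with
  | case1 i h hm ih =>
      conv_rhs => rw [smallsFrom]
      simp only [dif_pos h, if_pos hm, List.filter_cons]
      rw [ih]
      by_cases hsq : i * i = c <;> simp [hsq]
  | case2 i h hm ih =>
      conv_rhs => rw [smallsFrom]
      simp only [dif_pos h, if_neg hm]
      exact ih
  | case3 i h =>
      conv_rhs => rw [smallsFrom]
      simp [h]

-- exact-division facts for positive divisors of a positive number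
theorem fdiv_facts (c j : Int) (hc : 1 ≤ c) (hj : 1 ≤ j) (hd : j ∣ c) :
    PySem.Int.floordiv c j * j = c ∧ 1 ≤ PySem.Int.floordiv c j ∧
      PySem.Int.floordiv c j ≤ c ∧ PySem.Int.floordiv c j ∣ c := by
  rw [PySem.Int.floordiv_eq_ediv_of_pos (show (0:Int) < j by omega)]
  have hmul : c / j * j = c := Int.ediv_mul_cancel hd
  have h1 : 1 ≤ c / j := by nlinarith [hmul]
  refine ⟨hmul, h1, by nlinarith [hmul], ⟨j, hmul.symm⟩⟩

theorem aLoop_spec (c : Int) (_hc : 1 ≤ c) (h : Int) :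
    1 ≤ h → (1 ≤ pvALoop c h ∧ pvALoop c h ≤ h ∧ pvALoop c h ∣ c ∧
      (∀ d, 1 ≤ d → d ∣ c → d ≤ h → d ≤ pvALoop c h)) := by
  fun_induction pvALoop c h with
  | case1 head hcond ih =>
      intro _
      obtain ⟨hgt, hmod⟩ := hcond
      obtain ⟨i1, i2, i3, i4⟩ := ih (by omega)
      refine ⟨i1, by omega, i3, ?_⟩
      intro d hd1 hd2 hd3
      rcases eq_or_lt_of_le hd3 with heq | hlt
      · exact absurd ((PySem.Int.mod_eq_zero_iff_dvd c head).mpr (heq ▸ hd2)) hmod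
      · exact i4 d hd1 hd2 (by omega)
  | case2 head hcond =>
      intro hh1
      rcases eq_or_lt_of_le hh1 with heq | hgt
      · exact ⟨by omega, le_refl _, by rw [← heq]; exact one_dvd c,
          fun d _ _ hd3 => hd3⟩
      · have hmod : PySem.Int.mod c head = 0 := by
          by_contra hne
          exact hcond ⟨hgt, hne⟩
        exact ⟨by omega, le_refl _, (PySem.Int.mod_eq_zero_iff_dvd c head).mp hmod,
          fun d _ _ hd3 => hd3⟩

theorem find_desc (cap y : Int) (L : List Int) (hp : L.Pairwise (· > ·))
    (hyL : y ∈ L) (hy : y ≤ cap) (hmax : ∀ x ∈ L, x ≤ cap → x ≤ y) :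
    L.find? (fun d => d ≤ cap) = some y := by
  induction L with
  | nil => exact absurd hyL (List.not_mem_nil)
  | cons a t ih =>
      rw [List.find?_cons]
      by_cases hcap : a ≤ cap
      · simp only [decide_eq_true hcap]
        have hay : a ≤ y := hmax a List.mem_cons_self hcap
        rcases List.mem_cons.mp hyL with rfl | hyt
        · rfl
        · have : a > y := (List.pairwise_cons.mp hp).1 y hyt
          omega
      · simp only [decide_eq_false hcap]
        have hyt : y ∈ t := by
          rcases List.mem_cons.mp hyL with rfl | hyt
          · omega
          · exact hyt
        exact ih (List.pairwise_cons.mp hp).2 hyt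
          (fun x hx hxc => hmax x (List.mem_cons_of_mem a hx) hxc)

theorem mem_desc (c x : Int) (hc : 1 ≤ c) :
    x ∈ bigsFrom c 1 ++ (smallsFrom c 1).reverse ↔ 1 ≤ x ∧ x ≤ c ∧ x ∣ c := by
  rw [List.mem_append, List.mem_reverse, bigsFrom_eq,
    mem_smallsFrom c 1 x (le_refl 1)]
  simp only [List.mem_map, List.mem_filter]
  constructor
  · rintro (⟨j, ⟨hjm, hjne⟩, rfl⟩ | ⟨h1, h2, h3⟩)
    · obtain ⟨hj1, hjs, hjd⟩ := (mem_smallsFrom c 1 j (le_refl 1)).mp hjm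
      obtain ⟨e1, e2, e3, e4⟩ := fdiv_facts c j hc hj1 hjd
      exact ⟨e2, e3, e4⟩
    · exact ⟨h1, by nlinarith, h3⟩
  · rintro ⟨h1, h2, h3⟩
    by_cases hsq : x * x ≤ c
    · exact Or.inr ⟨h1, hsq, h3⟩
    · left
      obtain ⟨k, hk⟩ := h3
      have hk1 : 1 ≤ k := by nlinarith
      have hkx : k < x := by nlinarith
      have hkd : k ∣ c := ⟨x, by linarith [mul_comm x k]⟩
      refine ⟨k, ⟨(mem_smallsFrom c 1 k (le_refl 1)).mpr ⟨hk1, by nlinarith, hkd⟩,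
        by simp; nlinarith⟩, ?_⟩
      obtain ⟨e1, e2, e3, e4⟩ := fdiv_facts c k hc hk1 hkd
      nlinarith [e1]

theorem fdiv_strict_anti (c j j' : Int) (hc : 1 ≤ c) (hj : 1 ≤ j) (hjj : j < j')
    (hd : j ∣ c) (hd' : j' ∣ c) :
    PySem.Int.floordiv c j' < PySem.Int.floordiv c j := by
  obtain ⟨e1, e2, e3, e4⟩ := fdiv_facts c j hc hj hd
  obtain ⟨f1, f2, f3, f4⟩ := fdiv_facts c j' hc (by omega) hd'
  nlinarith

theorem pairwise_map_fdiv (c : Int) (hc : 1 ≤ c) (L : List Int)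
    (hL : L.Pairwise (· < ·)) (hmem : ∀ j ∈ L, 1 ≤ j ∧ j ∣ c) :
    (L.map (fun j => PySem.Int.floordiv c j)).Pairwise (· > ·) := by
  induction L with
  | nil => exact List.Pairwise.nil
  | cons a t ih =>
      obtain ⟨ha, ht⟩ := List.pairwise_cons.mp hL
      refine List.Pairwise.cons ?_ (ih ht (fun j hj => hmem j (List.mem_cons_of_mem a hj)))
      intro x hx
      obtain ⟨b, hb, rfl⟩ := List.mem_map.mp hx
      obtain ⟨ha1, had⟩ := hmem a List.mem_cons_self
      obtain ⟨hb1, hbd⟩ := hmem b (List.mem_cons_of_mem a hb)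
      exact fdiv_strict_anti c a b hc ha1 (ha b hb) had hbd

theorem desc_pairwise (c : Int) (hc : 1 ≤ c) :
    (bigsFrom c 1 ++ (smallsFrom c 1).reverse).Pairwise (· > ·) := by
  rw [List.pairwise_append]
  refine ⟨?_, ?_, ?_⟩
  · rw [bigsFrom_eq]
    refine pairwise_map_fdiv c hc _
      (List.Pairwise.filter _ (smallsFrom_pairwise c 1 (le_refl 1))) ?_
    intro j hj
    obtain ⟨h1, _, h3⟩ :=
      (mem_smallsFrom c 1 j (le_refl 1)).mp (List.mem_of_mem_filter hj)
    exact ⟨h1, h3⟩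
  · rw [List.pairwise_reverse]
    exact (smallsFrom_pairwise c 1 (le_refl 1)).imp (fun h => h)
  · intro x hx y hy
    rw [List.mem_reverse] at hy
    rw [bigsFrom_eq] at hx
    obtain ⟨j, hj, rfl⟩ := List.mem_map.mp hx
    obtain ⟨hj1, hjs, hjd⟩ :=
      (mem_smallsFrom c 1 j (le_refl 1)).mp (List.mem_of_mem_filter hj)
    have hjne : j * j ≠ c := by
      have := List.of_mem_filter hj
      simpa using this
    obtain ⟨e1, e2, e3, e4⟩ := fdiv_facts c j hc hj1 hjd
    obtain ⟨hy1, hys, hyd⟩ := (mem_smallsFrom c 1 y (le_refl 1)).mp hy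
    have hjslt : j * j < c := lt_of_le_of_ne hjs hjne
    -- j < floordiv c j, so (floordiv c j)^2 > c ≥ y^2, hence y < floordiv c j
    have hjlt : j < PySem.Int.floordiv c j := by nlinarith
    nlinarith

theorem elementwise (c r : Int) :
    max 1 (pvALoop c (min (max 1 r) c)) =
      ((bigsFrom c 1 ++ (smallsFrom c 1).reverse).find?
        (fun d => d ≤ min (max 1 r) c)).getD 1 := by
  by_cases hc : 1 ≤ c
  · set cap := min (max 1 r) c with hcap
    have hcap1 : 1 ≤ cap := by omega
    have hcapc : cap ≤ c := by omega
    obtain ⟨h1, h2, h3, h4⟩ := aLoop_spec c hc cap hcap1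
    rw [find_desc cap (pvALoop c cap) _ (desc_pairwise c hc)
      ((mem_desc c _ hc).mpr ⟨h1, by omega, h3⟩) h2 ?_]
    · simp; omega
    · intro x hx hxc
      obtain ⟨g1, g2, g3⟩ := (mem_desc c x hc).mp hx
      exact h4 x g1 g3 hxc
  · have hs : smallsFrom c 1 = [] := by rw [smallsFrom]; simp; omega
    have hb : bigsFrom c 1 = [] := by rw [bigsFrom]; simp; omega
    have hm : min (max 1 r) c = c := by omega
    rw [hs, hb, hm]
    rw [pvALoop]
    simp only [List.append_nil, List.reverse_nil, List.find?_nil, Option.getD_none]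
    rw [dif_neg (show ¬(1 < c ∧ PySem.Int.mod c c ≠ 0) by omega)]
    omega

-- B's inner scan is find-first on the descending divisor list
theorem pvBScan_eq_find (L : List Int) (cap : Int) :
    pvBScan L cap = (L.find? (fun d => d ≤ cap)).getD 1 := by
  induction L with
  | nil => rfl
  | cons a t ih =>
      rw [pvBScan, List.find?_cons]
      by_cases h : a ≤ cap
      · simp [h]
      · simp [h, ih]

-- the memo dict only caches values of pvBScan, so the fold produces the plain map
theorem foldl_memo (desc : List Int) (c : Int) (xs : List Int)
    (d : PySem.Dict Int Int) (acc : List Int)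
    (hinv : ∀ k v, d.get? k = some v → v = pvBScan desc k) :
    (xs.foldl
      (fun (st : PySem.Dict Int Int × List Int) requested =>
        let cap := min (max 1 requested) c
        match st.1.get? cap with
        | some head => (st.1, st.2 ++ [head])
        | none => (st.1.insert cap (pvBScan desc cap), st.2 ++ [pvBScan desc cap]))
      (d, acc)).2 = acc ++ xs.map (fun r => pvBScan desc (min (max 1 r) c)) := by
  induction xs generalizing d acc with
  | nil => simp
  | cons r rest ih =>
      simp only [List.foldl_cons, List.map_cons]
      cases hg : d.get? (min (max 1 r) c) with
      | some head =>
          have hhead := hinv _ _ hg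
          rw [ih d _ hinv, hhead]
          simp
      | none =>
          rw [ih _ _ ?_]
          · simp
          · intro k v hk
            rw [PySem.Dict.get?_insert] at hk
            split at hk
            · rename_i heq
              rw [heq]
              exact (Option.some_inj.mp hk).symm
            · exact hinv _ _ hk

-- ===== VERDICT (by name: the statement is the Claim_ definition above) =====
theorem sanitize_heads_py_spec : Claim_equal_sanitize_heads_py := by
  intro num_heads channels hdom
  clear hdom
  unfold Spec_sanitize_heads_py sanitize_heads_py sanitize_heads_py_alt
  rw [pvBuildDivs_eq]
  simp only [List.nil_append]
  rw [foldl_memo (bigsFrom channels 1 ++ (smallsFrom channels 1).reverse) channels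
    num_heads PySem.Dict.empty []
    (by intro k v h; rw [PySem.Dict.get?_empty] at h; exact absurd h (by simp))]
  simp only [List.nil_append]
  induction num_heads using List.reverseRecOn with
  | nil => simp
  | append_singleton xs x ih =>
      simp only [List.foldl_append, List.foldl_cons, List.foldl_nil, List.map_append,
        List.map_cons, List.map_nil, ih]
      rw [pvBScan_eq_find, elementwise]
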